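-- pv_equiv track=rewrite | github.com/exterpolation/gsgen | src/main.py | generate_clantag
-- ===== SOURCE A (Python) =====
-- def generate_clantag(user_clantag: str) -> list[str]:
--     """
--     Generates the animated clantag sequences.
--     :param user_clantag: The input clantag from the user
--     :return: A list of clantag sequences
--     """
--     clantag = []
--     length = len(user_clantag)
--
--     # Building up the clantag (left padding)
--     for i in range(length + 1):
--         clantag.append(f"{' ' * (length - i)}{user_clantag[:i]}")
--
--     # Shifting spaces from left to right while removing characters
--     for i in range(1, length):
--         clantag.append(f"{user_clantag[i:]}{' ' * i}")
--
--     return clantag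
-- ===== SOURCE B (Python) =====
-- def generate_clantag(user_clantag: str) -> list[str]:
--     """Sliding-window re-implementation: every width-`length` window of a padded buffer."""
--     length = len(user_clantag)
--     padded = ' ' * length + user_clantag + ' ' * (length - 1)
--     return [padded[s:s + length] for s in range(len(padded) - length + 1)]
-- ===== Notes on version B (the rewrite author's own statement) =====
-- stated objective: alternative
-- what changed: Replaces A's two separate formatting loops (left-padding build-up, then right-shift) by one uniform pass collecting every fixed-width window of a single space-padded buffer (length leading and length-1 trailing blanks around the tag).
import Mathlib
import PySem

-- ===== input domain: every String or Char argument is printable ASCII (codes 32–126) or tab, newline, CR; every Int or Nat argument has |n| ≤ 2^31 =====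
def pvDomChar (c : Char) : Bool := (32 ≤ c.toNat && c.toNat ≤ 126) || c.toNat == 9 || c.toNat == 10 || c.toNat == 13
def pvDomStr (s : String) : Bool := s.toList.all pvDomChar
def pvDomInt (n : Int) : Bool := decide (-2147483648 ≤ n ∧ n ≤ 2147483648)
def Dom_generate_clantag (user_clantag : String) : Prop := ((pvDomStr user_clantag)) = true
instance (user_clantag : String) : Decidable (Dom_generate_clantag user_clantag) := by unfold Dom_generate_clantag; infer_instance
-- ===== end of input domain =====

-- B replaces A's two formatting loops (left-padding build-up, then right-shift) by one uniform
-- pass collecting every width-`length` window of a padded buffer (alternative decomposition, same cost).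

-- ===== PORT A =====
def generate_clantag (user_clantag : String) : List String :=
  let cs := user_clantag.toList
  let length : Int := cs.length
  -- first loop: building up the clantag (left padding)
  let clantag := (PySem.List.pyRange 0 (length + 1) 1).foldl
    (fun acc i => acc ++ [String.ofList (List.replicate (length - i).toNat ' ' ++ PySem.List.slice cs none (some i))]) []
  -- second loop: shifting spaces from left to right while removing characters
  (PySem.List.pyRange 1 length 1).foldl
    (fun acc i => acc ++ [String.ofList (PySem.List.slice cs (some i) none ++ List.replicate i.toNat ' ')]) clantag

-- ===== PORT B =====
def generate_clantag_alt (user_clantag : String) : List String :=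
  let cs := user_clantag.toList
  let length : Int := cs.length
  let padded := List.replicate length.toNat ' ' ++ cs ++ List.replicate (length - 1).toNat ' '
  (PySem.List.pyRange 0 ((padded.length : Int) - length + 1) 1).map
    (fun s => String.ofList (PySem.List.slice padded (some s) (some (s + length))))

-- ===== PRECONDITION & SPEC =====
def Spec_generate_clantag (user_clantag : String) (out : List String) : Prop := out = generate_clantag_alt user_clantag
instance (user_clantag : String) (out : List String) : Decidable (Spec_generate_clantag user_clantag out) := by unfold Spec_generate_clantag; infer_instance

-- ===== CLAIM (what is proved, stated in full; the proofs are below) =====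
def Claim_equal_generate_clantag : Prop := ∀ (user_clantag : String), Dom_generate_clantag user_clantag → Spec_generate_clantag user_clantag (generate_clantag user_clantag)

-- ===== LEMMAS AND PROOFS =====

-- window starting at k ≤ n reproduces A's left-padding entry
lemma windowL (cs : List Char) (k : Nat) (hk : k ≤ cs.length) :
    ((List.replicate cs.length ' ' ++ cs ++ List.replicate (cs.length - 1) ' ').drop k).take cs.length
      = List.replicate (cs.length - k) ' ' ++ cs.take k := by
  have e1 : k - cs.length = 0 := by omega
  have e2 : cs.length - (cs.length - k) = k := by omega
  simp [List.drop_append, List.take_append, List.drop_replicate, List.take_replicate, e1, e2]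

-- window starting at n + i, 1 ≤ i ≤ n-1, reproduces A's right-shift entry
lemma windowR (cs : List Char) (i : Nat) (h1 : 1 ≤ i) (h2 : i ≤ cs.length - 1) :
    ((List.replicate cs.length ' ' ++ cs ++ List.replicate (cs.length - 1) ' ').drop (cs.length + i)).take cs.length
      = cs.drop i ++ List.replicate i ' ' := by
  have e2 : cs.length - (cs.length - i) = i := by omega
  have e3 : cs.length - 1 - (i - cs.length) = cs.length - 1 := by omega
  have e4 : min i (cs.length - 1) = i := by omega
  have e5 : List.take cs.length (cs.drop i) = cs.drop i := List.take_of_length_le (by simp)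
  simp [List.drop_append, List.take_append, List.drop_replicate, List.take_replicate, e2, e3, e4, e5]

lemma main_eq (cs : List Char) :
    (PySem.List.pyRange 1 (cs.length:Int) 1).foldl
      (fun acc i => acc ++ [String.ofList (PySem.List.slice cs (some i) none ++ List.replicate i.toNat ' ')])
      ((PySem.List.pyRange 0 ((cs.length:Int) + 1) 1).foldl
        (fun acc i => acc ++ [String.ofList (List.replicate ((cs.length:Int) - i).toNat ' ' ++ PySem.List.slice cs none (some i))]) [])
    =
    (PySem.List.pyRange 0
      ((((List.replicate (cs.length:Int).toNat ' ' ++ cs ++ List.replicate ((cs.length:Int) - 1).toNat ' ').length : Nat) : Int)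
        - (cs.length:Int) + 1) 1).map
      (fun s => String.ofList (PySem.List.slice
        (List.replicate (cs.length:Int).toNat ' ' ++ cs ++ List.replicate ((cs.length:Int) - 1).toNat ' ')
        (some s) (some (s + (cs.length:Int))))) := by
  rcases Nat.eq_zero_or_pos cs.length with h0 | hpos
  · obtain rfl : cs = [] := List.length_eq_zero_iff.mp h0
    decide
  have hrep : ((cs.length : Int) - 1).toNat = cs.length - 1 := by omega
  have hrep0 : ((cs.length : Int)).toNat = cs.length := by omega
  rw [PySem.List.foldl_append_singleton_eq_map, PySem.List.foldl_append_singleton_eq_map,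
      List.nil_append, hrep, hrep0]
  have hb : ((((List.replicate cs.length ' ' ++ cs ++ List.replicate (cs.length - 1) ' ').length : Nat) : Int)
      - (cs.length:Int) + 1) = (cs.length : Int) + cs.length := by
    simp; omega
  rw [hb, PySem.List.pyRange_one_append 0 ((cs.length:Int)+1) ((cs.length:Int)+(cs.length:Int)) (by omega) (by omega),
      List.map_append]
  congr 1
  · -- windows 0..n are the left-padding entries
    symm
    apply List.map_congr_left
    intro i hi
    rw [PySem.List.mem_pyRange_one] at hi
    rw [PySem.List.slice_toNat _ hi.1 (by omega), PySem.List.slice_to _ hi.1]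
    have e1 : (i + (cs.length:Int)).toNat - i.toNat = cs.length := by omega
    have e2 : ((cs.length:Int) - i).toNat = cs.length - i.toNat := by omega
    rw [e1, e2, windowL cs i.toNat (by omega)]
  · -- windows n+1..2n-1 are the right-shift entries
    rw [PySem.List.pyRange_one 1 (cs.length:Int),
        PySem.List.pyRange_one ((cs.length:Int)+1) ((cs.length:Int)+(cs.length:Int))]
    have e3 : ((cs.length:Int) + cs.length - ((cs.length:Int) + 1)).toNat = ((cs.length:Int) - 1).toNat := by omega
    rw [e3, List.map_map, List.map_map]
    apply List.map_congr_left
    intro k hk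
    rw [List.mem_range] at hk
    simp only [Function.comp_apply]
    rw [PySem.List.slice_from _ (by omega : (0:Int) ≤ 1 + (k:Int)),
        PySem.List.slice_toNat _ (by omega) (by omega)]
    have e4 : ((cs.length:Int) + 1 + (k:Int) + cs.length).toNat - ((cs.length:Int) + 1 + (k:Int)).toNat = cs.length := by omega
    have e5 : ((cs.length:Int) + 1 + (k:Int)).toNat = cs.length + (1 + k) := by omega
    have e6 : ((1:Int) + (k:Int)).toNat = 1 + k := by omega
    rw [e4, e5, e6, windowR cs (1+k) (by omega) (by omega)]

-- ===== VERDICT (by name: the statement is the Claim_ definition above) =====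
theorem generate_clantag_spec : Claim_equal_generate_clantag := by
  intro s _
  unfold Spec_generate_clantag generate_clantag generate_clantag_alt
  exact main_eq s.toList
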